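-- pv_equiv track=rewrite | github.com/Schexter/StitchAdmin | src/controllers/production_controller.py | group_orders_by_type
-- ===== SOURCE A (Python) =====
-- def group_orders_by_type(orders):
--     """Gruppiere Aufträge nach Produktionstyp"""
--     grouped = {
--         'embroidery': [],
--         'printing': [],
--         'combined': []
--     }
--
--     for order_id, order in orders.items():
--         order_type = order.get('order_type', 'embroidery')
--         if order_type in grouped:
--             grouped[order_type].append(order)
--
--     return grouped
-- ===== SOURCE B (Python) =====
-- def group_orders_by_type(orders):
--     """Gruppiere Aufträge nach Produktionstyp"""
--     return {t: [o for o in orders.values() if o.get('order_type', 'embroidery') == t]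
--             for t in ('embroidery', 'printing', 'combined')}
-- ===== Notes on version B (the rewrite author's own statement) =====
-- stated objective: idiomatic
-- what changed: Replaces the mutable three-bucket dict with a single dispatching pass by a dict comprehension over the fixed key tuple that filters orders.values() once per bucket.
import Mathlib
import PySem

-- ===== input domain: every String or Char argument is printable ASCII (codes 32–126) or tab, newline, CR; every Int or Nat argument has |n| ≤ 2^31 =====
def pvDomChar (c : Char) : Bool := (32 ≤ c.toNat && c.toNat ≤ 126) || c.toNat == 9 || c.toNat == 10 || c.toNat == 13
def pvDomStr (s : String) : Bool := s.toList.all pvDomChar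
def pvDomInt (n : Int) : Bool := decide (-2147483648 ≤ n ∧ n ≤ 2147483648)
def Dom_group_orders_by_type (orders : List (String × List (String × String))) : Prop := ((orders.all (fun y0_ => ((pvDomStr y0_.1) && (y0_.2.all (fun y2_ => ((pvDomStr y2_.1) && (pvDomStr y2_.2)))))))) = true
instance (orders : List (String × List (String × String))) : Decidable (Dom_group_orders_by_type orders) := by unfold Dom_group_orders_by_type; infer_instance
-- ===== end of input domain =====

-- B groups with an idiomatic comprehension over the fixed key tuple (three filtering passes)
-- instead of A's single dispatching pass into a mutable three-bucket dict; same return value.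

-- ===== PORT A =====
-- order.get('order_type', 'embroidery') on the inner dict (association list)
def pvOrderType (o : List (String × String)) : String :=
  (PySem.Dict.mk o).getD "order_type" "embroidery"

def group_orders_by_type (orders : List (String × List (String × String))) : List (String × List (List (String × String))) :=
  let grouped : PySem.Dict String (List (List (String × String))) :=
    orders.foldl (fun g p =>
      let t := pvOrderType p.2
      if g.contains t then g.modify t [] (· ++ [p.2]) else g)
      (PySem.Dict.ofList [("embroidery", []), ("printing", []), ("combined", [])])
  grouped.items

-- ===== PORT B =====
def group_orders_by_type_alt (orders : List (String × List (String × String))) : List (String × List (List (String × String))) :=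
  ["embroidery", "printing", "combined"].map (fun t =>
    (t, (orders.map (·.2)).filter (fun o => pvOrderType o == t)))

-- ===== PRECONDITION & SPEC =====
def Spec_group_orders_by_type (orders : List (String × List (String × String))) (out : List (String × List (List (String × String)))) : Prop := out = group_orders_by_type_alt orders
instance (orders : List (String × List (String × String))) (out : List (String × List (List (String × String)))) : Decidable (Spec_group_orders_by_type orders out) := by unfold Spec_group_orders_by_type; infer_instance

-- ===== CLAIM (what is proved, stated in full; the proofs are below) =====
def Claim_equal_group_orders_by_type : Prop := ∀ (orders : List (String × List (String × String))), Dom_group_orders_by_type orders → Spec_group_orders_by_type orders (group_orders_by_type orders)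

-- ===== LEMMAS AND PROOFS =====
theorem mEmb {X : Type} (a b c : List X) (f : List X → List X) :
    (PySem.Dict.mk [("embroidery",a),("printing",b),("combined",c)]).modify "embroidery" [] f
      = PySem.Dict.mk [("embroidery", f a),("printing",b),("combined",c)] := rfl
theorem mPr {X : Type} (a b c : List X) (f : List X → List X) :
    (PySem.Dict.mk [("embroidery",a),("printing",b),("combined",c)]).modify "printing" [] f
      = PySem.Dict.mk [("embroidery", a),("printing",f b),("combined",c)] := rfl
theorem mCo {X : Type} (a b c : List X) (f : List X → List X) :
    (PySem.Dict.mk [("embroidery",a),("printing",b),("combined",c)]).modify "combined" [] f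
      = PySem.Dict.mk [("embroidery", a),("printing",b),("combined",f c)] := rfl
theorem group_loop_items (l : List (List (String × String))) (a b c : List (List (String × String))) :
    (l.foldl (fun (g : PySem.Dict String (List (List (String × String)))) o =>
        let t := pvOrderType o
        if g.contains t then g.modify t [] (· ++ [o]) else g)
      (PySem.Dict.mk [("embroidery", a), ("printing", b), ("combined", c)])).items
    = [("embroidery", a ++ l.filter (fun o => pvOrderType o == "embroidery")),
       ("printing",   b ++ l.filter (fun o => pvOrderType o == "printing")),
       ("combined",   c ++ l.filter (fun o => pvOrderType o == "combined"))] := by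
  induction l generalizing a b c with
  | nil => simp
  | cons o rest ih =>
    simp only [List.foldl_cons, List.filter_cons]
    by_cases h1 : pvOrderType o = "embroidery"
    · rw [h1]
      have hc : (PySem.Dict.mk [("embroidery",a),("printing",b),("combined",c)]).contains "embroidery" = true := rfl
      simp only [hc, if_true, mEmb, ih]
      simp
    · by_cases h2 : pvOrderType o = "printing"
      · rw [h2]
        have hc : (PySem.Dict.mk [("embroidery",a),("printing",b),("combined",c)]).contains "printing" = true := rfl
        simp only [hc, if_true, mPr, ih]
        simp
      · by_cases h3 : pvOrderType o = "combined"
        · rw [h3]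
          have hc : (PySem.Dict.mk [("embroidery",a),("printing",b),("combined",c)]).contains "combined" = true := rfl
          simp only [hc, if_true, mCo, ih]
          simp
        · have hc : (PySem.Dict.mk [("embroidery",a),("printing",b),("combined",c)]).contains (pvOrderType o) = false := by
            simp [PySem.Dict.contains]
            exact ⟨fun h => h1 h.symm, fun h => h2 h.symm, fun h => h3 h.symm⟩
          simp only [hc, if_neg, Bool.false_eq_true, if_false, ih]
          simp [h1, h2, h3]

-- ===== VERDICT (by name: the statement is the Claim_ definition above) =====
theorem group_orders_by_type_spec : Claim_equal_group_orders_by_type := by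
  intro orders _
  unfold Spec_group_orders_by_type group_orders_by_type group_orders_by_type_alt
  have h := group_loop_items (orders.map (·.2)) [] [] []
  simp only [List.foldl_map] at h
  have e : PySem.Dict.ofList ([("embroidery", []), ("printing", []), ("combined", [])] : List (String × List (List (String × String)))) = PySem.Dict.mk [("embroidery", []), ("printing", []), ("combined", [])] := rfl
  rw [e]
  simpa using h
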